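-- pv_equiv track=rewrite | github.com/mathiscalonnec/Fantom_opera_IA | test_fantom.py | find_max_and_reduce_predictions
-- ===== SOURCE A (Python) =====
-- def find_max_and_reduce_predictions(predictions, depth):
--     new_pred = []
--     max_score = 0
--
--     for pred in predictions:
--         if pred[depth]["score"] > max_score:
--             max_score = pred[depth]["score"]
--
--     for pred in predictions:
--         if pred[depth]["score"] == max_score:
--             new_pred.append(pred)
--
--     return new_pred
-- ===== SOURCE B (Python) =====
-- def find_max_and_reduce_predictions(predictions, depth):
--     max_score = 0
--     new_pred = []
--     for pred in predictions:
--         s = pred[depth]["score"]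
--         if s > max_score:
--             max_score = s
--             new_pred = [pred]
--         elif s == max_score:
--             new_pred.append(pred)
--     return new_pred
-- ===== Notes on version B (the rewrite author's own statement) =====
-- stated objective: simpler
-- what changed: Replaces A's two separate passes (one to find the max score, one to collect the matches) by a single pass that maintains the running max together with the current candidate list, resetting the list when a new max appears.
import Mathlib
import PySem

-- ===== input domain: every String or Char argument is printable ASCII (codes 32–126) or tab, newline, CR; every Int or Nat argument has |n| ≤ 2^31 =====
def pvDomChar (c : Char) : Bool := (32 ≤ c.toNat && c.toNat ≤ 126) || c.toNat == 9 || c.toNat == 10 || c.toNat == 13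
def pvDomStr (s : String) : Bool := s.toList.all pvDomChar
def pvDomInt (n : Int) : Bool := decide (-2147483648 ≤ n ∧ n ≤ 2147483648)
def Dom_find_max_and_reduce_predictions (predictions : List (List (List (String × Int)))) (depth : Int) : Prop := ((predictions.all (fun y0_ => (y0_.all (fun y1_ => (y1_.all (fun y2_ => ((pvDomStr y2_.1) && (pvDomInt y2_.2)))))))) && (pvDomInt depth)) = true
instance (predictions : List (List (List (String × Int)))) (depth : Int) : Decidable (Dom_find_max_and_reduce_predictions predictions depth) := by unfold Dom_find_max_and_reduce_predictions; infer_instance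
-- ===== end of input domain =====

-- B replaces A's two passes (max, then collect) by ONE pass maintaining (running max, candidates) together; same O(n) cost, simpler shape.

-- shared accessor for the Python expression pred[depth]["score"]:
-- none = IndexError on pred[depth] or KeyError on ["score"]; Pre_ excludes exactly those inputs
def pvScore? (pred : List (List (String × Int))) (depth : Int) : Option Int :=
  (PySem.List.pyGet? pred depth).bind (fun d => (PySem.Dict.mk d).get? "score")

-- total form used by the ports; under Pre_ the .getD 0 default is never taken
def pvScore (pred : List (List (String × Int))) (depth : Int) : Int :=
  (pvScore? pred depth).getD 0

-- ===== PORT A =====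
def find_max_and_reduce_predictions (predictions : List (List (List (String × Int)))) (depth : Int) : List (List (List (String × Int))) :=
  -- first loop: max_score = 0; if pred[depth]["score"] > max_score: max_score = …
  let max_score : Int :=
    predictions.foldl (fun m pred => if pvScore pred depth > m then pvScore pred depth else m) 0
  -- second loop: new_pred.append(pred) when the score equals max_score
  predictions.foldl (fun acc pred => if pvScore pred depth == max_score then acc ++ [pred] else acc) []

-- ===== PORT B =====
def find_max_and_reduce_predictions_alt (predictions : List (List (List (String × Int)))) (depth : Int) : List (List (List (String × Int))) :=
  -- single pass over (max_score, new_pred)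
  (predictions.foldl
    (fun st pred =>
      let s := pvScore pred depth
      if s > st.1 then (s, [pred])
      else if s == st.1 then (st.1, st.2 ++ [pred])
      else st)
    ((0 : Int), ([] : List (List (List (String × Int)))))).2

-- ===== PRECONDITION & SPEC =====
-- Pre_ excludes exactly the inputs where pred[depth]["score"] raises (IndexError / KeyError) for some pred
def Pre_find_max_and_reduce_predictions (predictions : List (List (List (String × Int)))) (depth : Int) : Prop :=
  ∀ pred ∈ predictions,
    PySem.Raise.InRange pred.length depth ∧
    "score" ∈ (PySem.List.pyGetD pred depth []).map Prod.fst
instance (predictions : List (List (List (String × Int)))) (depth : Int) : Decidable (Pre_find_max_and_reduce_predictions predictions depth) := by unfold Pre_find_max_and_reduce_predictions; infer_instance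

def pvWitness_find_max_and_reduce_predictions : (List (List (List (String × Int)))) × Int :=
  ([[[("score", 2)]], [[("score", 1)]], [[("score", 2)]]], 0)

def Spec_find_max_and_reduce_predictions (predictions : List (List (List (String × Int)))) (depth : Int) (out : List (List (List (String × Int)))) : Prop := out = find_max_and_reduce_predictions_alt predictions depth
instance (predictions : List (List (List (String × Int)))) (depth : Int) (out : List (List (List (String × Int)))) : Decidable (Spec_find_max_and_reduce_predictions predictions depth out) := by unfold Spec_find_max_and_reduce_predictions; infer_instance

-- ===== CLAIM (what is proved, stated in full; the proofs are below) =====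
def Claim_equal_find_max_and_reduce_predictions : Prop := ∀ (predictions : List (List (List (String × Int)))) (depth : Int), Dom_find_max_and_reduce_predictions predictions depth → Pre_find_max_and_reduce_predictions predictions depth → Spec_find_max_and_reduce_predictions predictions depth (find_max_and_reduce_predictions predictions depth)

-- ===== LEMMAS AND PROOFS =====

-- the running max never decreases below its seed
theorem pv_maxF_le (depth : Int) (l : List (List (List (String × Int)))) :
    ∀ m : Int, m ≤ l.foldl (fun m pred => if pvScore pred depth > m then pvScore pred depth else m) m := by
  induction l with
  | nil => intro m; simp
  | cons p t ih =>
    intro m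
    simp only [List.foldl_cons]
    split
    · exact le_trans (le_of_lt (by assumption)) (ih _)
    · exact ih _

-- every element's score is bounded by the final running max
theorem pv_score_le_maxF (depth : Int) (l : List (List (List (String × Int)))) :
    ∀ (m : Int) (p : List (List (String × Int))), p ∈ l →
      pvScore p depth ≤ l.foldl (fun m pred => if pvScore pred depth > m then pvScore pred depth else m) m := by
  induction l with
  | nil => intro m p hp; simp at hp
  | cons q t ih =>
    intro m p hp
    simp only [List.foldl_cons]
    rcases List.mem_cons.mp hp with h | h
    · subst h
      refine le_trans ?_ (pv_maxF_le depth t _)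
      split
      · exact le_refl _
      · omega
    · exact ih _ p h

-- the single pass computes (final max, preds whose score equals that final max)
theorem pv_key (depth : Int) (l : List (List (List (String × Int)))) :
    l.foldl
      (fun st pred =>
        let s := pvScore pred depth
        if s > st.1 then (s, [pred])
        else if s == st.1 then (st.1, st.2 ++ [pred])
        else st)
      ((0 : Int), ([] : List (List (List (String × Int)))))
    = (l.foldl (fun m pred => if pvScore pred depth > m then pvScore pred depth else m) 0,
       l.filter (fun p => pvScore p depth == l.foldl (fun m pred => if pvScore pred depth > m then pvScore pred depth else m) 0)) := by
  induction l using List.reverseRecOn with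
  | nil => simp
  | append_singleton t p ih =>
    rw [List.foldl_append, List.foldl_append, ih]
    simp only [List.foldl_cons, List.foldl_nil, List.filter_append, List.filter_cons,
      List.filter_nil]
    set M := t.foldl (fun m pred => if pvScore pred depth > m then pvScore pred depth else m) 0 with hM
    by_cases hgt : pvScore p depth > M
    · -- new maximum: the candidate list resets; no earlier score can equal the new max
      have hnone : t.filter (fun q => pvScore q depth == pvScore p depth) = [] := by
        apply List.filter_eq_nil_iff.mpr
        intro q hq
        have := pv_score_le_maxF depth t 0 q hq
        rw [← hM] at this
        simp only [beq_iff_eq]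
        omega
      simp [hgt, hnone]
    · by_cases heq : pvScore p depth = M
      · simp [heq]
      · -- strictly smaller: state unchanged, and p is filtered out
        have : ¬ (pvScore p depth == M) = true := by simp [heq]
        simp [hgt, heq]

-- A's second loop is a filter
theorem pv_A_eq_filter (depth : Int) (l : List (List (List (String × Int)))) (M : Int) :
    l.foldl (fun acc pred => if pvScore pred depth == M then acc ++ [pred] else acc) []
      = l.filter (fun p => pvScore p depth == M) := by
  simpa using PySem.List.foldl_append_if_eq_filter (fun p => pvScore p depth == M) l []

-- ===== VERDICT (by name: the statement is the Claim_ definition above) =====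
theorem find_max_and_reduce_predictions_spec : Claim_equal_find_max_and_reduce_predictions := by
  intro predictions depth _ _
  unfold Spec_find_max_and_reduce_predictions
  unfold find_max_and_reduce_predictions find_max_and_reduce_predictions_alt
  rw [pv_key, pv_A_eq_filter]
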